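-- pv_equiv track=rewrite | github.com/Anayatc/CodeWars | Password_Maker(BETA).py | make_password
-- ===== SOURCE A (Python) =====
-- def make_password(phrase):
--     output = ''
--     chars = {'i': '1', 'I': '1', 'o': '0', 'O': '0', 's': '5', 'S': '5',}
--     for i in phrase.split():
--         output += i[0]
--     for key, value in chars.items():
--         output = output.replace(key, value)
--     return output
-- ===== SOURCE B (Python) =====
-- def _sub(c):
--     if c in 'iI':
--         return '1'
--     if c in 'oO':
--         return '0'
--     if c in 'sS':
--         return '5'
--     return c
--
--
-- def make_password(phrase):
--     # Single character-level pass: a word starts at a non-space character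
--     # preceded by a space (or the start of the string); substitute it on the fly.
--     out = []
--     prev_space = True
--     for c in phrase:
--         if prev_space and not c.isspace():
--             out.append(_sub(c))
--         prev_space = c.isspace()
--     return ''.join(out)
-- ===== Notes on version B (the rewrite author's own statement) =====
-- stated objective: alternative
-- what changed: B is a single character-level state-machine pass that detects word starts (non-space after space/start) and substitutes each initial on the fly, instead of A's split + string-concatenation loop followed by six whole-string .replace sweeps.
import Mathlib
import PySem

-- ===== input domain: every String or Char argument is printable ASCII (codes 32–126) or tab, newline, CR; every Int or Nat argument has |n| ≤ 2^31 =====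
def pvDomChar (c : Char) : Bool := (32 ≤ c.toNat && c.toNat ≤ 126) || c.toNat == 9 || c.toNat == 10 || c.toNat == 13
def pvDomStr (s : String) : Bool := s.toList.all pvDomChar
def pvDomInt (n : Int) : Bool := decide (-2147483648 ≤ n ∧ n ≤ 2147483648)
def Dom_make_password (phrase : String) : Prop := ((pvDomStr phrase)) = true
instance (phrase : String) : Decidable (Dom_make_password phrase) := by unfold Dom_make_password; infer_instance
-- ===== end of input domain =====

-- B replaces A's split + concatenation loop + six whole-string .replace sweeps by a
-- single character-level state-machine pass that substitutes each word initial on the fly.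


-- ===== PORT A =====
-- for-loop accumulating i[0] (split() yields only nonempty words, so the 'none'
-- branch of pyGet? is unreachable), then the for-loop over the dict's items as
-- six sequential replace calls in the dict's insertion order.
def make_password (phrase : String) : String :=
  let output := (PySem.Str.split₀ phrase).foldl
    (fun out w =>
      match PySem.Str.pyGet? w 0 with
      | some c => out.push c
      | none => out) ""
  let output := PySem.Str.replace output "i" "1"
  let output := PySem.Str.replace output "I" "1"
  let output := PySem.Str.replace output "o" "0"
  let output := PySem.Str.replace output "O" "0"
  let output := PySem.Str.replace output "s" "5"
  PySem.Str.replace output "S" "5"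

-- ===== PORT B =====
-- Source B's _sub: the if-chain of 'c in "iI"' … membership tests, in the same order
def pwSub (c : Char) : Char :=
  if c = 'i' ∨ c = 'I' then '1'
  else if c = 'o' ∨ c = 'O' then '0'
  else if c = 's' ∨ c = 'S' then '5'
  else c

-- Source B's loop: one pass over the characters with the prev_space flag; when a
-- non-space character follows a space (or the start), append its substitution.
def make_password_alt (phrase : String) : String :=
  let r := phrase.toList.foldl
    (fun (st : List Char × Bool) c =>
      (if st.2 && !(PySem.Chars.isspace c) then st.1 ++ [pwSub c] else st.1,
       PySem.Chars.isspace c))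
    ([], true)
  String.ofList r.1

-- ===== PRECONDITION & SPEC =====
def Spec_make_password (phrase : String) (out : String) : Prop := out = make_password_alt phrase
instance (phrase : String) (out : String) : Decidable (Spec_make_password phrase out) := by unfold Spec_make_password; infer_instance

-- ===== CLAIM (what is proved, stated in full; the proofs are below) =====
def Claim_equal_make_password : Prop := ∀ (phrase : String), Dom_make_password phrase → Spec_make_password phrase (make_password phrase)

-- ===== LEMMAS AND PROOFS =====

-- single-char replace is a per-character map
def pwRep (a b c : Char) : Char := if c = a then b else c

theorem replace_go_single (a b : Char) :
    ∀ (l : List Char) (fuel : Nat) (acc : List Char), l.length ≤ fuel →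
      PySem.Chars.replace.go [a] [b] fuel l acc = acc.reverse ++ l.map (pwRep a b) := by
  intro l
  induction l with
  | nil =>
      intro fuel acc _
      cases fuel <;> simp [PySem.Chars.replace.go]
  | cons c t ih =>
      intro fuel acc h
      cases fuel with
      | zero => simp at h
      | succ n =>
          simp only [PySem.Chars.replace.go]
          by_cases hc : c = a
          · have hp : ([a].isPrefixOf (c :: t)) = true := by
              simp [List.isPrefixOf, hc]
            rw [hp]
            simp only [if_true]
            rw [show List.drop [a].length (c :: t) = t from rfl,
              ih n ([b].reverse ++ acc) (Nat.le_of_succ_le_succ h)]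
            simp [pwRep, hc]
          · have hp : ([a].isPrefixOf (c :: t)) = false := by
              simp [List.isPrefixOf]; exact fun h' => (hc h'.symm).elim
            rw [hp]
            simp only [Bool.false_eq_true, if_false]
            rw [ih n (c :: acc) (Nat.le_of_succ_le_succ h)]
            simp [pwRep, hc]

theorem replace_single (a b : Char) (l : List Char) :
    PySem.Chars.replace l [a] [b] = l.map (pwRep a b) := by
  simp only [PySem.Chars.replace, List.isEmpty_cons, Bool.false_eq_true, if_false]
  exact replace_go_single a b l l.length [] (Nat.le_refl _)

-- the six chained single-char replacements compose to B's substitution function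
theorem pwSub_eq_comp (c : Char) :
    pwRep 'S' '5' (pwRep 's' '5' (pwRep 'O' '0' (pwRep 'o' '0'
      (pwRep 'I' '1' (pwRep 'i' '1' c))))) = pwSub c := by
  simp only [pwRep, pwSub]
  by_cases h1 : c = 'i' <;> by_cases h2 : c = 'I' <;> by_cases h3 : c = 'o' <;>
    by_cases h4 : c = 'O' <;> by_cases h5 : c = 's' <;> by_cases h6 : c = 'S' <;>
    simp_all

-- A's accumulation loop collects exactly the heads of the split words
theorem foldl_push_heads (ws : List String) (s : String) :
    (ws.foldl (fun out w =>
        match PySem.Str.pyGet? w 0 with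
        | some c => out.push c
        | none => out) s).toList
      = s.toList ++ ws.filterMap (fun w => w.toList.head?) := by
  induction ws generalizing s with
  | nil => simp
  | cons w ws ih =>
      simp only [List.foldl_cons, List.filterMap_cons]
      have hg : PySem.Str.pyGet? w (0 : Int) = w.toList.head? := by
        have := PySem.Str.pyGet?_natCast w (0 : Nat)
        simpa [List.head?_eq_getElem?] using this
      cases hh : w.toList.head? with
      | none =>
          rw [show (match PySem.Str.pyGet? w 0 with
              | some c => s.push c | none => s) = s by rw [hg, hh]]
          exact ih s
      | some c =>
          rw [show (match PySem.Str.pyGet? w 0 with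
              | some c => s.push c | none => s) = s.push c by rw [hg, hh]]
          rw [ih]
          simp

-- the word-initial scan, in recursive form (proof-side model of B's loop)
def scanInit : List Char → Bool → List Char
  | [], _ => []
  | c :: t, prev =>
    if prev && !(PySem.Chars.isspace c) then c :: scanInit t (PySem.Chars.isspace c)
    else scanInit t (PySem.Chars.isspace c)

-- B's foldl computes the scan (with the substitution applied pointwise)
theorem foldB_eq (l : List Char) : ∀ (out : List Char) (prev : Bool),
    (l.foldl
      (fun (st : List Char × Bool) c =>
        (if st.2 && !(PySem.Chars.isspace c) then st.1 ++ [pwSub c] else st.1,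
         PySem.Chars.isspace c))
      (out, prev)).1 = out ++ (scanInit l prev).map pwSub := by
  induction l with
  | nil => intro out prev; simp [scanInit]
  | cons c t ih =>
      intro out prev
      simp only [List.foldl_cons, scanInit]
      by_cases h : prev && !(PySem.Chars.isspace c)
      · rw [if_pos h, if_pos h, ih]; simp
      · rw [if_neg h, if_neg h, ih]

-- the heads of split()'s words are exactly the word-start characters of the scan
theorem split_go_heads (l : List Char) :
    ∀ (cur : List Char) (acc : List (List Char)),
      (PySem.Chars.split₀.go l cur acc).filterMap List.head?
        = (acc.reverse.filterMap List.head?) ++ cur.reverse.head?.toList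
            ++ scanInit l cur.isEmpty := by
  induction l with
  | nil =>
      intro cur acc
      simp only [PySem.Chars.split₀.go, scanInit]
      cases cur with
      | nil => simp
      | cons x xs => simp
  | cons c t ih =>
      intro cur acc
      simp only [PySem.Chars.split₀.go, scanInit]
      by_cases hs : PySem.Chars.isspace c <;> cases cur with
      | nil => simp [hs, ih]
      | cons x xs => simp [hs, ih]

theorem split₀_heads (l : List Char) :
    (PySem.Chars.split₀ l).filterMap List.head? = scanInit l true := by
  have := split_go_heads l [] []
  simpa [PySem.Chars.split₀] using this

theorem make_password_eq (phrase : String) :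
    make_password phrase = make_password_alt phrase := by
  unfold make_password make_password_alt
  simp only [PySem.Str.replace]
  rw [foldB_eq]
  apply congrArg String.ofList
  simp only [String.toList_ofList]
  rw [foldl_push_heads]
  simp only [show ("" : String).toList = [] from rfl, List.nil_append]
  have hsplit : (PySem.Str.split₀ phrase).filterMap (fun w => w.toList.head?)
      = scanInit phrase.toList true := by
    rw [← split₀_heads phrase.toList]
    simp [PySem.Str.split₀, List.filterMap_map, Function.comp]
  rw [hsplit]
  simp only [show "i".toList = ['i'] from rfl, show "1".toList = ['1'] from rfl,
    show "I".toList = ['I'] from rfl, show "o".toList = ['o'] from rfl,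
    show "0".toList = ['0'] from rfl, show "O".toList = ['O'] from rfl,
    show "s".toList = ['s'] from rfl, show "5".toList = ['5'] from rfl,
    show "S".toList = ['S'] from rfl]
  rw [replace_single, replace_single, replace_single, replace_single,
    replace_single, replace_single]
  simp only [List.map_map]
  refine List.map_congr_left fun c _ => ?_
  simpa [Function.comp] using pwSub_eq_comp c

-- ===== VERDICT (by name: the statement is the Claim_ definition above) =====
theorem make_password_spec : Claim_equal_make_password := by
  intro phrase _
  exact make_password_eq phrase
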